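-- pv_equiv track=rewrite | github.com/kkr010128/codebert | problem171/problem171_102.py | slow_solve
-- ===== SOURCE A (Python) =====
-- def slow_solve(N, A):
--     import itertools
--     ans = 0
--     K = [i for i in range(N)]
--     for p in itertools.permutations(K):
--         tans = 0
--         for i in range(N):
--             tans += A[i] * abs(p[i] - i)
--         ans = max(ans, tans)
--     return ans
-- ===== SOURCE B (Python) =====
-- def slow_solve(N, A):
--     def best(i, rem):
--         if not rem:
--             return 0
--         return max(A[i] * abs(j - i) + best(i + 1, [k for k in rem if k != j]) for j in rem)
--     return max(0, best(0, list(range(N))))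
-- ===== Notes on version B (the rewrite author's own statement) =====
-- stated objective: alternative
-- what changed: B replaces A's enumerate-all-permutations-then-rescore pass (itertools.permutations plus an inner indexed sum per permutation) by a recursive branch-and-max search that picks the value for each position in turn, accumulating the partial sum incrementally so shared prefixes are scored once.
import Mathlib
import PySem

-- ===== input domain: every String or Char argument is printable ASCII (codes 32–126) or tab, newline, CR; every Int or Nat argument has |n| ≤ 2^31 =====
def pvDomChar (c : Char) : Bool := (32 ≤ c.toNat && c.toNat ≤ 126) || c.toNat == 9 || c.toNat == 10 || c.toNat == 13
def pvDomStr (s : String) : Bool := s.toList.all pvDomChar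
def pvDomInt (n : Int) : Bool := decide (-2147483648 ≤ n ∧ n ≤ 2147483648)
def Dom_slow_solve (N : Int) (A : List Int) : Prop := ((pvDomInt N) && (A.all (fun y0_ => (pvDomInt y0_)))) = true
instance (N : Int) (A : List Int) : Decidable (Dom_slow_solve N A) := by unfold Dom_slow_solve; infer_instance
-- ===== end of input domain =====

-- B replaces A's enumerate-every-permutation-then-score pass by a recursive branch-and-max
-- over the remaining positions with incremental sums (objective: alternative; return value only).

-- ===== PORT A =====
-- hand port of itertools.permutations over a list of DISTINCT elements (K = range(N) is
-- always distinct): select each element in list order, recurse on the rest; exact there.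
def permsFuel : Nat → List Int → List (List Int)
  | 0, _ => [[]]
  | n+1, l => l.flatMap (fun x => (permsFuel n (l.erase x)).map (fun q => x :: q))

def slow_solve (N : Int) (A : List Int) : Int :=
  (permsFuel (PySem.List.pyRange 0 N 1).length (PySem.List.pyRange 0 N 1)).foldl
    (fun ans p =>
      max ans ((PySem.List.pyRange 0 N 1).foldl
        (fun t i => t + PySem.List.pyGetD A i 0 * |PySem.List.pyGetD p i 0 - i|) 0))
    0

-- ===== PORT B =====
def pvW (A : List Int) (i j : Int) : Int := PySem.List.pyGetD A i 0 * |j - i|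

-- best(i, rem): max over j in rem of A[i]*|j-i| + best(i+1, rem without j);
-- fuel = rem.length makes the recursion structural (the `0` fuel branch is unreachable).
def dfsB (A : List Int) : Nat → Int → List Int → Int
  | _, _, [] => 0
  | 0, _, _ :: _ => 0
  | n+1, i, j :: rest =>
      rest.foldl
        (fun b k => max b (pvW A i k + dfsB A n (i+1) ((j :: rest).filter (fun x => x != k))))
        (pvW A i j + dfsB A n (i+1) ((j :: rest).filter (fun x => x != j)))

def slow_solve_alt (N : Int) (A : List Int) : Int :=
  max 0 (dfsB A (PySem.List.pyRange 0 N 1).length 0 (PySem.List.pyRange 0 N 1))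

-- ===== PRECONDITION & SPEC =====
-- Pre_ excludes exactly the inputs where the Python A raises IndexError: A[i] for i in range(N)
-- needs N ≤ len(A).
def Pre_slow_solve (N : Int) (A : List Int) : Prop := N ≤ (A.length : Int)
instance (N : Int) (A : List Int) : Decidable (Pre_slow_solve N A) := by unfold Pre_slow_solve; infer_instance
def pvWitness_slow_solve : Int × List Int := (2, [1, 5])

def Spec_slow_solve (N : Int) (A : List Int) (out : Int) : Prop := out = slow_solve_alt N A
instance (N : Int) (A : List Int) (out : Int) : Decidable (Spec_slow_solve N A out) := by unfold Spec_slow_solve; infer_instance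

-- ===== CLAIM (what is proved, stated in full; the proofs are below) =====
def Claim_equal_slow_solve : Prop := ∀ (N : Int) (A : List Int), Dom_slow_solve N A → Pre_slow_solve N A → Spec_slow_solve N A (slow_solve N A)

-- ===== LEMMAS AND PROOFS =====

-- the score of one permutation, accumulated structurally from position i on
def scoreAux (A : List Int) : Int → List Int → Int
  | _, [] => 0
  | i, x :: q => pvW A i x + scoreAux A (i+1) q

theorem scoreAux_append (A : List Int) (q : List Int) (x : Int) :
    ∀ i : Int, scoreAux A i (q ++ [x]) = scoreAux A i q + pvW A (i + q.length) x := by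
  induction q with
  | nil => intro i; simp [scoreAux]
  | cons y q ih =>
      intro i
      simp only [List.cons_append, scoreAux, ih (i+1), List.length_cons]
      have : i + 1 + (q.length : Int) = i + ((q.length : Int) + 1) := by ring
      rw [this]
      push_cast
      ring

theorem foldl_flatMap_int {α β : Type} (l : List α) (f : α → List β) (g : Int → β → Int) (c : Int) :
    (l.flatMap f).foldl g c = l.foldl (fun acc x => (f x).foldl g acc) c := by
  induction l generalizing c with
  | nil => rfl
  | cons x l ih => simp [List.flatMap_cons, List.foldl_append, ih]

theorem tans_eq_scoreAux (A : List Int) (p : List Int) :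
    (PySem.List.pyRange 0 (p.length : Int) 1).foldl
      (fun t i => t + PySem.List.pyGetD A i 0 * |PySem.List.pyGetD p i 0 - i|) 0
    = scoreAux A 0 p := by
  induction p using List.reverseRecOn with
  | nil => simp [PySem.List.pyRange_one_eq_nil, scoreAux]
  | append_singleton q x ih =>
      have hlen : ((q ++ [x]).length : Int) = (q.length : Int) + 1 := by simp
      rw [hlen, PySem.List.pyRange_one_succ_right (by positivity),
        List.foldl_append]
      have hcongr :
          (PySem.List.pyRange 0 (q.length : Int) 1).foldl
            (fun t i => t + PySem.List.pyGetD A i 0 * |PySem.List.pyGetD (q ++ [x]) i 0 - i|) 0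
          = (PySem.List.pyRange 0 (q.length : Int) 1).foldl
            (fun t i => t + PySem.List.pyGetD A i 0 * |PySem.List.pyGetD q i 0 - i|) 0 := by
        apply PySem.List.foldl_congr_mem
        intro t i hi
        rw [PySem.List.mem_pyRange_one] at hi
        have hget : PySem.List.pyGetD (q ++ [x]) i 0 = PySem.List.pyGetD q i 0 := by
          rw [PySem.List.pyGetD_eq_getElem (q ++ [x]) 0 hi.1 (by simp; omega),
            PySem.List.pyGetD_eq_getElem q 0 hi.1 (by omega)]
          exact List.getElem_append_left (by omega)
        rw [hget]
      rw [hcongr, ih]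
      have hx : PySem.List.pyGetD (q ++ [x]) (q.length : Int) 0 = x := by
        rw [PySem.List.pyGetD_natCast]
        simp
      simp only [List.foldl_cons, List.foldl_nil]
      rw [hx]
      have := scoreAux_append A q x 0
      rw [this]
      simp [pvW]

theorem perms_length (n : Nat) :
    ∀ (l : List Int), l.length = n → ∀ p ∈ permsFuel n l, p.length = n := by
  induction n with
  | zero => intro l _ p hp; simp [permsFuel] at hp; simp [hp]
  | succ n ih =>
      intro l hl p hp
      simp only [permsFuel, List.mem_flatMap, List.mem_map] at hp
      obtain ⟨x, hx, q, hq, rfl⟩ := hp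
      have hel : (l.erase x).length = n := by
        rw [List.length_erase_of_mem hx, hl]; omega
      simp [ih (l.erase x) hel q hq]

theorem fold_max_shift (g : Int → Int) (off : Int) :
    ∀ (l : List Int) (c v : Int),
      l.foldl (fun a x => max a (off + g x)) (max c (off + v))
        = max c (off + l.foldl (fun b k => max b (g k)) v) := by
  intro l
  induction l with
  | nil => intro c v; rfl
  | cons k l ih =>
      intro c v
      simp only [List.foldl_cons]
      have h : max (max c (off + v)) (off + g k) = max c (off + max v (g k)) := by omega
      rw [h, ih]

theorem main_max (A : List Int) (n : Nat) :
    ∀ (rem : List Int), rem.Nodup → rem.length = n →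
      ∀ (i off c : Int),
        (permsFuel n rem).foldl (fun a p => max a (off + scoreAux A i p)) c
          = max c (off + dfsB A n i rem) := by
  induction n with
  | zero =>
      intro rem _ hlen i off c
      have : rem = [] := List.eq_nil_of_length_eq_zero hlen
      subst this
      simp [permsFuel, dfsB, scoreAux]
  | succ n ih =>
      intro rem hnd hlen i off c
      match rem, hlen with
      | j :: rest, hlen =>
        rw [show permsFuel (n+1) (j :: rest)
            = (j :: rest).flatMap (fun x => (permsFuel n ((j :: rest).erase x)).map (fun q => x :: q)) from rfl,
          foldl_flatMap_int]
        have hcongr :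
            (j :: rest).foldl
              (fun acc x => ((permsFuel n ((j :: rest).erase x)).map (fun q => x :: q)).foldl
                (fun a p => max a (off + scoreAux A i p)) acc) c
            = (j :: rest).foldl
              (fun acc x => max acc (off + (pvW A i x + dfsB A n (i+1) ((j :: rest).erase x)))) c := by
          apply PySem.List.foldl_congr_mem
          intro acc x hx
          rw [List.foldl_map]
          have herase : ((j :: rest).erase x).length = n := by
            rw [List.length_erase_of_mem hx, hlen]; omega
          have hstep :
              (permsFuel n ((j :: rest).erase x)).foldl
                (fun a q => max a (off + scoreAux A i (x :: q))) acc
              = (permsFuel n ((j :: rest).erase x)).foldl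
                (fun a q => max a ((off + pvW A i x) + scoreAux A (i+1) q)) acc := by
            apply PySem.List.foldl_congr_mem
            intro a q _
            simp only [scoreAux]
            ring_nf
          rw [hstep, ih ((j :: rest).erase x) (hnd.erase x) herase (i+1) (off + pvW A i x) acc]
          ring_nf
        rw [hcongr]
        simp only [List.foldl_cons]
        rw [fold_max_shift (fun x => pvW A i x + dfsB A n (i+1) ((j :: rest).erase x)) off rest c
          (pvW A i j + dfsB A n (i+1) ((j :: rest).erase j))]
        have hfe : ∀ k : Int, (j :: rest).erase k = (j :: rest).filter (fun x => x != k) := by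
          intro k
          exact hnd.erase_eq_filter k
        simp only [dfsB, hfe]

theorem pyRange_self_len (N : Int) :
    PySem.List.pyRange 0 N 1
      = PySem.List.pyRange 0 (((PySem.List.pyRange 0 N 1).length : Int)) 1 := by
  rw [PySem.List.length_pyRange_one, PySem.List.pyRange_one, PySem.List.pyRange_one]
  have h : (N - 0).toNat = (((N - 0).toNat : Int) - 0).toNat := by omega
  rw [← h]

theorem slow_solve_eq (N : Int) (A : List Int) : slow_solve N A = slow_solve_alt N A := by
  unfold slow_solve slow_solve_alt
  have hK : (PySem.List.pyRange 0 N 1).Nodup := PySem.List.nodup_pyRange_one 0 N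
  have h1 :
      (permsFuel (PySem.List.pyRange 0 N 1).length (PySem.List.pyRange 0 N 1)).foldl
        (fun ans p =>
          max ans ((PySem.List.pyRange 0 N 1).foldl
            (fun t i => t + PySem.List.pyGetD A i 0 * |PySem.List.pyGetD p i 0 - i|) 0))
        0
      = (permsFuel (PySem.List.pyRange 0 N 1).length (PySem.List.pyRange 0 N 1)).foldl
        (fun ans p => max ans (0 + scoreAux A 0 p)) 0 := by
    apply PySem.List.foldl_congr_mem
    intro ans p hp
    have hlen : p.length = (PySem.List.pyRange 0 N 1).length :=
      perms_length (PySem.List.pyRange 0 N 1).length (PySem.List.pyRange 0 N 1) rfl p hp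
    rw [show (PySem.List.pyRange 0 N 1).foldl
          (fun t i => t + PySem.List.pyGetD A i 0 * |PySem.List.pyGetD p i 0 - i|) 0
        = (PySem.List.pyRange 0 (p.length : Int) 1).foldl
          (fun t i => t + PySem.List.pyGetD A i 0 * |PySem.List.pyGetD p i 0 - i|) 0 from by
      rw [hlen, ← pyRange_self_len]]
    rw [tans_eq_scoreAux, zero_add]
  rw [h1, main_max A (PySem.List.pyRange 0 N 1).length (PySem.List.pyRange 0 N 1) hK rfl 0 0 0,
    zero_add]

-- ===== VERDICT (by name: the statement is the Claim_ definition above) =====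
theorem slow_solve_spec : Claim_equal_slow_solve := by
  intro N A _ _
  unfold Spec_slow_solve
  exact slow_solve_eq N A
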